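-- pv_equiv track=rewrite | github.com/uros-5/bookstore | Knjizara/utils/Knjiga.py | srediNaslov
-- ===== SOURCE A (Python) =====
-- def srediNaslov(naslov):
-- 	duzina = len(naslov)
-- 	brojac = 0
-- 	naslov2 = ""
-- 	if(duzina>16):
-- 		for i in range(0, duzina):
-- 			naslov2 += naslov[i]
-- 			brojac += 1
-- 			if (brojac == 18):
-- 				naslov2 += "\n"
-- 				brojac = 0
-- 		return naslov2
-- 	return naslov
-- ===== SOURCE B (Python) =====
-- def srediNaslov(naslov):
-- 	duzina = len(naslov)
-- 	if duzina <= 16: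
-- 		return naslov
-- 	parts = []
-- 	for i in range(0, duzina, 18):
-- 		parts.append(naslov[i:i+18])
-- 		if i + 18 <= duzina:
-- 			parts.append("\n")
-- 	return "".join(parts)
-- ===== Notes on version B (the rewrite author's own statement) =====
-- stated objective: faster
-- what changed: Replaces the char-by-char loop with a mod-18 counter and quadratic string concatenation by slicing the string into 18-char blocks with a step-18 range and joining them, emitting a newline exactly after each completed block.
import Mathlib
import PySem

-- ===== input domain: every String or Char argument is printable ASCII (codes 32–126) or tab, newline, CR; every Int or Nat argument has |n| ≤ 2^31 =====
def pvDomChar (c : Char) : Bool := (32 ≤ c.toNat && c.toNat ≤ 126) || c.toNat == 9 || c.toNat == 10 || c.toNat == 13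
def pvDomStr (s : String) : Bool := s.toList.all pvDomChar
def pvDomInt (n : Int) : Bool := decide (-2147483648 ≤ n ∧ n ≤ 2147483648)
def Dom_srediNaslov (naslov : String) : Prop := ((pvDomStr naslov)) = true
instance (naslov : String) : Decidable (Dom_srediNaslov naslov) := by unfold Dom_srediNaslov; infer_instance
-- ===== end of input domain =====

-- B replaces A's char-by-char loop and quadratic string concatenation by slicing
-- 18-char blocks with a step-18 range and joining, a newline after each completed block.

-- ===== PORT A =====
def srediNaslovStep (p : Int × List Char) (c : Char) : Int × List Char :=
  let naslov2 := p.2 ++ [c]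
  let brojac := p.1 + 1
  if brojac = 18 then (0, naslov2 ++ ['\n']) else (brojac, naslov2)

def srediNaslov (naslov : String) : String :=
  let cs := naslov.toList
  let duzina : Int := PySem.List.len cs
  if 16 < duzina then
    String.ofList (cs.foldl srediNaslovStep (0, [])).2
  else naslov

-- ===== PORT B =====
def srediNaslov_alt (naslov : String) : String :=
  let cs := naslov.toList
  let duzina : Int := PySem.List.len cs
  if duzina ≤ 16 then naslov
  else
    let parts := (PySem.List.pyRange 0 duzina 18).foldl
      (fun (parts : List (List Char)) i =>
        parts ++ [PySem.List.slice cs (some i) (some (i + 18))] ++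
          (if i + 18 ≤ duzina then [['\n']] else [])) []
    String.ofList parts.flatten

-- ===== PRECONDITION & SPEC =====
def Spec_srediNaslov (naslov : String) (out : String) : Prop := out = srediNaslov_alt naslov
instance (naslov : String) (out : String) : Decidable (Spec_srediNaslov naslov out) := by unfold Spec_srediNaslov; infer_instance

-- ===== CLAIM (what is proved, stated in full; the proofs are below) =====
def Claim_equal_srediNaslov : Prop := ∀ (naslov : String), Dom_srediNaslov naslov → Spec_srediNaslov naslov (srediNaslov naslov)

-- ===== LEMMAS AND PROOFS =====

-- the common result: 18-char blocks each followed by '\n', final partial block bare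
def pvChunk (cs : List Char) : List Char :=
  if _h : 18 ≤ cs.length then cs.take 18 ++ '\n' :: pvChunk (cs.drop 18) else cs
termination_by cs.length
decreasing_by simp; omega

lemma pvRange18_cons (a b : Int) (h : a < b) :
    PySem.List.pyRange a b 18 = a :: PySem.List.pyRange (a + 18) b 18 := by
  rw [PySem.List.pyRange_of_pos _ _ (by norm_num), PySem.List.pyRange_of_pos _ _ (by norm_num)]
  by_cases hb : a + 18 < b
  · have hd : (b - a + 18 - 1) / 18 = (b - (a + 18) + 18 - 1) / 18 + 1 := by omega
    simp only [if_pos h, if_pos hb, hd]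
    have htn : ((b - (a + 18) + 18 - 1) / 18 + 1).toNat = ((b - (a + 18) + 18 - 1) / 18).toNat + 1 := by
      omega
    rw [htn, List.range_succ_eq_map]
    simp [List.map_map, Function.comp_def]
    intro k _
    ring
  · have hd : (b - a + 18 - 1) / 18 = 1 := by omega
    simp [if_pos h, if_neg hb, hd, List.range_succ]

lemma pvBlockLt (ds : List Char) : ∀ (b : Int) (acc : List Char), 0 ≤ b →
    b + ds.length < 18 →
    ds.foldl srediNaslovStep (b, acc) = (b + ds.length, acc ++ ds) := by
  induction ds with
  | nil => intro b acc _ _; simp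
  | cons c t ih =>
    intro b acc hb hlt
    simp only [List.foldl_cons, srediNaslovStep]
    have hne : ¬ (b + 1 = 18) := by simp at hlt; omega
    simp only [if_neg hne]
    rw [ih (b + 1) (acc ++ [c]) (by omega) (by simp at hlt ⊢; omega)]
    simp; omega

lemma pvBlock18 (ds : List Char) (acc : List Char) (h : ds.length = 18) :
    ds.foldl srediNaslovStep (0, acc) = (0, acc ++ ds ++ ['\n']) := by
  have hsplit : ds = ds.take 17 ++ ds.drop 17 := (List.take_append_drop 17 ds).symm
  have hlen : (ds.drop 17).length = 1 := by simp [h]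
  obtain ⟨c, hc⟩ : ∃ c, ds.drop 17 = [c] := by
    cases hdrop : ds.drop 17 with
    | nil => rw [hdrop] at hlen; simp at hlen
    | cons x t =>
      rw [hdrop] at hlen; simp at hlen
      exact ⟨x, by simp [hlen]⟩
  rw [hsplit, hc, List.foldl_append]
  rw [pvBlockLt (ds.take 17) 0 acc (le_refl 0) (by simp [h])]
  simp [h, srediNaslovStep]

lemma pvA_loop (cs : List Char) (acc : List Char) :
    (cs.foldl srediNaslovStep (0, acc)).2 = acc ++ pvChunk cs := by
  by_cases h : 18 ≤ cs.length
  · have hsplit : cs = cs.take 18 ++ cs.drop 18 := (List.take_append_drop 18 cs).symm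
    conv_lhs => rw [hsplit]
    rw [List.foldl_append, pvBlock18 (cs.take 18) acc (by simp [h])]
    rw [pvA_loop (cs.drop 18) (acc ++ cs.take 18 ++ ['\n'])]
    conv_rhs => rw [pvChunk]
    rw [dif_pos h]
    simp
  · rw [pvBlockLt cs 0 acc (le_refl 0) (by omega)]
    rw [pvChunk, dif_neg h]
termination_by cs.length
decreasing_by simp; omega

lemma pvB_loop (cs : List Char) : ∀ (j : Nat),
    (PySem.List.pyRange (j : Int) (cs.length : Int) 18).flatMap
      (fun i => PySem.List.slice cs (some i) (some (i + 18)) ++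
        (if i + 18 ≤ (cs.length : Int) then ['\n'] else [])) = pvChunk (cs.drop j) := by
  intro j
  by_cases hj : (j : Int) < (cs.length : Int)
  · rw [pvRange18_cons _ _ hj, List.flatMap_cons]
    have hslice : PySem.List.slice cs (some (j : Int)) (some ((j : Int) + 18)) =
        (cs.drop j).take 18 := by
      have := PySem.List.slice_natCast_add cs j 18
      simpa using this
    rw [hslice]
    by_cases h18 : (j : Int) + 18 ≤ (cs.length : Int)
    · rw [if_pos h18]
      have hcast : (j : Int) + 18 = ((j + 18 : Nat) : Int) := by push_cast; ring
      rw [hcast, pvB_loop cs (j + 18)]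
      have hlen : 18 ≤ (cs.drop j).length := by simp; omega
      conv_rhs => rw [pvChunk]
      rw [dif_pos hlen]
      have hdd : List.drop 18 (List.drop j cs) = List.drop (j + 18) cs := by
        rw [List.drop_drop, Nat.add_comm]
      rw [hdd]
      simp
    · rw [if_neg h18]
      have hempty : PySem.List.pyRange ((j : Int) + 18) (cs.length : Int) 18 = [] := by
        rw [PySem.List.pyRange_of_pos _ _ (by norm_num)]
        simp only [if_neg (by omega : ¬ ((j : Int) + 18 < (cs.length : Int))), List.range_zero,
          List.map_nil]
      rw [hempty]
      have hlt : ¬ 18 ≤ (cs.drop j).length := by simp; omega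
      conv_rhs => rw [pvChunk]
      rw [dif_neg hlt]
      simp only [List.flatMap_nil, List.append_nil]
      exact List.take_of_length_le (by simp; omega)
  · have hempty : PySem.List.pyRange (j : Int) (cs.length : Int) 18 = [] := by
      rw [PySem.List.pyRange_of_pos _ _ (by norm_num)]
      simp only [if_neg hj, List.range_zero, List.map_nil]
    rw [hempty]
    have hd : cs.drop j = [] := List.drop_of_length_le (by omega)
    rw [hd, pvChunk]
    simp
termination_by j => cs.length - j
decreasing_by omega

lemma pvFlatten_flatMap {α β : Type} (g : α → List (List β)) (l : List α) :
    (l.flatMap g).flatten = l.flatMap (fun i => (g i).flatten) := by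
  induction l with
  | nil => simp
  | cons x t ih => simp [ih]

lemma pvB_flatten (cs : List Char) :
    ((PySem.List.pyRange 0 (cs.length : Int) 18).foldl
      (fun (parts : List (List Char)) i =>
        parts ++ [PySem.List.slice cs (some i) (some (i + 18))] ++
          (if i + 18 ≤ (cs.length : Int) then [['\n']] else [])) []).flatten = pvChunk cs := by
  have hfold : ((PySem.List.pyRange 0 (cs.length : Int) 18).foldl
      (fun (parts : List (List Char)) i =>
        parts ++ [PySem.List.slice cs (some i) (some (i + 18))] ++
          (if i + 18 ≤ (cs.length : Int) then [['\n']] else [])) []) =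
      (PySem.List.pyRange 0 (cs.length : Int) 18).flatMap
        (fun i => [PySem.List.slice cs (some i) (some (i + 18))] ++
          (if i + 18 ≤ (cs.length : Int) then [['\n']] else [])) := by
    have haux := PySem.List.foldl_append_eq_flatMap
      (fun i => [PySem.List.slice cs (some i) (some (i + 18))] ++
        (if i + 18 ≤ (cs.length : Int) then [['\n']] else []))
      (PySem.List.pyRange 0 (cs.length : Int) 18) []
    simp only [List.nil_append] at haux
    rw [← haux]
    simp only [List.append_assoc]
  rw [hfold, pvFlatten_flatMap]
  have hmain := pvB_loop cs 0
  simp only [Nat.cast_zero, List.drop_zero] at hmain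
  rw [← hmain]
  apply List.flatMap_congr
  intro i _
  split_ifs <;> simp

-- ===== VERDICT (by name: the statement is the Claim_ definition above) =====
theorem srediNaslov_spec : Claim_equal_srediNaslov := by
  intro naslov _
  unfold Spec_srediNaslov srediNaslov srediNaslov_alt
  simp only [PySem.List.len_eq]
  by_cases h : (16 : Int) < (naslov.toList.length : Int)
  · rw [if_pos h, if_neg (by omega)]
    rw [pvA_loop naslov.toList []]
    refine congrArg String.ofList ?_
    rw [List.nil_append]
    exact (pvB_flatten naslov.toList).symm
  · rw [if_neg h, if_pos (by omega)]
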